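-- pv_equiv track=rewrite | github.com/PRKKILLER/Algorithm_Practice | Company-OA/salesforce/maximum substring.py | solution
-- ===== SOURCE A (Python) =====
-- def solution(s):
--     if not s: return s
--
--     tmp = [0, s[0]]
--
--     for i, c in enumerate(s):
--         if c > tmp[1]:
--             tmp[0] = i
--             tmp[1] = c
--
--     return s[tmp[0]:]
-- ===== SOURCE B (Python) =====
-- def solution(s):
--     # Build the answer back-to-front: scan s from the right, maintaining the
--     # current suffix and the best answer so far; a character at least as large
--     # as the answer's first character starts a new (longer) answer, which gives
--     # first-occurrence-of-max semantics.
--     ans = ""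
--     suf = ""
--     for c in reversed(s):
--         suf = c + suf
--         if not ans or c >= ans[0]:
--             ans = suf
--     return ans
-- ===== Notes on version B (the rewrite author's own statement) =====
-- stated objective: alternative
-- what changed: Replaces A's left-to-right fused loop that tracks (index, running max) and then slices, with a right-to-left scan that builds the answer suffix back-to-front: it maintains the current suffix and promotes it to the answer whenever the new character is >= the answer's first character, so no index or slice is ever computed.
import Mathlib
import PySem

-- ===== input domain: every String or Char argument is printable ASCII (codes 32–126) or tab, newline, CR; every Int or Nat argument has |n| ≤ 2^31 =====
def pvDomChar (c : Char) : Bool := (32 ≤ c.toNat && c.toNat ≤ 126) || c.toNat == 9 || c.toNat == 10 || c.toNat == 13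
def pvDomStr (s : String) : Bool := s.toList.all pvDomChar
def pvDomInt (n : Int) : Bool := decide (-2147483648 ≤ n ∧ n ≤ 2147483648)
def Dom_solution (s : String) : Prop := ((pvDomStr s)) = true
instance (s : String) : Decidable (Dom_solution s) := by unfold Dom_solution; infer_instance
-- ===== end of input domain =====

-- B replaces A's left-to-right index-tracking loop + slice with a right-to-left scan that
-- builds the answer suffix back-to-front (no index, no slice); alternative decomposition.

-- ===== PORT A =====
-- A: tmp = [0, s[0]]; for i, c in enumerate(s): if c > tmp[1]: tmp = [i, c]; return s[tmp[0]:]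
def solution (s : String) : String :=
  match s.toList with
  | [] => s
  | c :: t =>
    let tmp := (PySem.List.enumerate (c :: t) 0).foldl
      (fun tmp ic => if tmp.2 < ic.2 then (ic.1, ic.2) else tmp) ((0 : Int), c)
    String.ofList (PySem.List.slice (c :: t) (some tmp.1) none)

-- ===== PORT B =====
-- B: ans = ""; suf = ""; for c in reversed(s): suf = c + suf; if not ans or c >= ans[0]: ans = suf
def solAltStep (p : List Char × List Char) (c : Char) : List Char × List Char :=
  let suf := c :: p.2
  match p.1 with
  | [] => (suf, suf)
  | a :: r => if a ≤ c then (suf, suf) else (a :: r, suf)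

def solution_alt (s : String) : String :=
  String.ofList ((s.toList.reverse.foldl solAltStep ([], [])).1)

-- ===== PRECONDITION & SPEC =====
def Spec_solution (s : String) (out : String) : Prop := out = solution_alt s
instance (s : String) (out : String) : Decidable (Spec_solution s out) := by unfold Spec_solution; infer_instance

-- ===== CLAIM =====
def Claim_equal_solution : Prop := ∀ (s : String), Dom_solution s → Spec_solution s (solution s)

-- ===== LEMMAS AND PROOFS =====

-- pure-list rendering of B's loop result (the answer component), recursion on the front
def gB : List Char → List Char
  | [] => []
  | c :: t =>
    match gB t with
    | [] => c :: t
    | a :: r => if a ≤ c then c :: t else a :: r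

lemma gB_cons (c : Char) (t : List Char) :
    gB (c :: t) = match gB t with
      | [] => c :: t
      | a :: r => if a ≤ c then c :: t else a :: r := rfl

lemma foldl_step_eq_gB (l : List Char) :
    l.reverse.foldl solAltStep ([], []) = (gB l, l) := by
  induction l with
  | nil => rfl
  | cons c t ih =>
    rw [List.reverse_cons, List.foldl_append, ih]
    simp only [List.foldl_cons, List.foldl_nil, solAltStep, gB_cons]
    cases gB t with
    | nil => rfl
    | cons a r => by_cases h : a ≤ c <;> simp [h]

lemma foldl_max_mem' (l : List Char) (a : Char) : l.foldl max a ∈ a :: l := by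
  induction l generalizing a with
  | nil => simp
  | cons c t ih =>
    simp only [List.foldl_cons]
    rcases List.mem_cons.mp (ih (max a c)) with h | h
    · rcases max_choice a c with h2 | h2 <;> rw [h2] at h ⊢ <;> simp [h]
    · simp [h]

-- gB on a nonempty list drops exactly up to the first occurrence of the running max
lemma gB_spec (c : Char) (t : List Char) :
    ∃ k, PySem.List.index? (c :: t) (t.foldl max c) = some k ∧
      gB (c :: t) = (c :: t).drop k := by
  induction t generalizing c with
  | nil =>
    refine ⟨0, ?_, by simp [gB]⟩
    rw [show List.foldl max c [] = c from rfl, PySem.List.index?_cons_self]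
  | cons c' t' ih =>
    obtain ⟨k', hk', hg'⟩ := ih c'
    obtain ⟨hlen, hget, -⟩ := PySem.List.getElem_of_index?_eq_some hk'
    have hhead : gB (c' :: t') = (t'.foldl max c') :: (c' :: t').drop (k' + 1) := by
      rw [hg', List.drop_eq_getElem_cons hlen, hget]
    have hM := PySem.List.le_foldl_max (c' :: t') c
    have hMmem := foldl_max_mem' (c' :: t') c
    have hbound : ∀ y ∈ c' :: t', y ≤ t'.foldl max c' := by
      intro y hy
      rcases List.mem_cons.mp hy with h | h
      · exact h ▸ (PySem.List.le_foldl_max t' c').1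
      · exact (PySem.List.le_foldl_max t' c').2 _ h
    have hgc : gB (c :: c' :: t') =
        if List.foldl max c' t' ≤ c then c :: c' :: t'
        else (t'.foldl max c') :: (c' :: t').drop (k' + 1) := by
      rw [gB_cons, hhead]
    rw [hgc]
    by_cases hle : t'.foldl max c' ≤ c
    · -- the new character dominates: the whole-list max is c, first occurrence at index 0
      have hMc : List.foldl max c (c' :: t') = c := by
        refine le_antisymm ?_ hM.1
        rcases List.mem_cons.mp hMmem with h | h
        · exact le_of_eq h
        · exact le_trans (hbound _ h) hle
      refine ⟨0, ?_, by simp [hle]⟩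
      rw [show (c' :: t').foldl max c = c from hMc, PySem.List.index?_cons_self]
    · -- the old max survives: the whole-list max is the tail max, its index shifts by one
      have hc : c < t'.foldl max c' := lt_of_not_ge hle
      have hMeq : List.foldl max c (c' :: t') = t'.foldl max c' := by
        refine le_antisymm ?_ (hM.2 _ ?_)
        · rcases List.mem_cons.mp hMmem with h | h
          · exact absurd (h ▸ hM.2 _ (foldl_max_mem' t' c')) (not_le.mpr hc)
          · exact hbound _ h
        · exact foldl_max_mem' t' c'
      refine ⟨k' + 1, ?_, ?_⟩
      · rw [show (c' :: t').foldl max c = t'.foldl max c' from hMeq,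
          PySem.List.index?_cons_of_ne _ (ne_of_lt hc), hk']
        rfl
      · rw [if_neg hle, ← hhead, hg']
        exact (List.drop_succ_cons).symm

-- characterisation of A's fused loop (final index = offset first occurrence of running max)
lemma loopA (l : List Char) (k j : Int) (a : Char) :
    (PySem.List.enumerate l k).foldl
      (fun tmp ic => if tmp.2 < ic.2 then (ic.1, ic.2) else tmp) (j, a)
    = (if l.foldl max a = a then (j, a)
       else (k + (((PySem.List.index? l (l.foldl max a)).getD 0 : Nat) : Int), l.foldl max a)) := by
  induction l generalizing k j a with
  | nil => simp [PySem.List.enumerate]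
  | cons c t ih =>
    rw [PySem.List.enumerate_cons, List.foldl_cons, List.foldl_cons]
    by_cases hac : a < c
    · simp only [hac, if_true]
      rw [ih]
      have hmax : max a c = c := max_eq_right hac.le
      rw [hmax]
      have hle : c ≤ t.foldl max c := (PySem.List.le_foldl_max t c).1
      have hne : t.foldl max c ≠ a := fun h => absurd (h ▸ hle) (not_le.mpr hac)
      by_cases hc : t.foldl max c = c
      · simp only [hc, if_true]
        rw [if_neg (ne_of_gt hac), PySem.List.index?_cons_self]
        simp
      · have hcm : c ≠ t.foldl max c := fun h => hc h.symm
        have hmem : t.foldl max c ∈ t := by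
          rcases List.mem_cons.mp (foldl_max_mem' t c) with h | h
          · exact absurd h hc
          · exact h
        obtain ⟨i0, hi0⟩ := Option.isSome_iff_exists.mp
          ((PySem.List.index?_isSome_iff t (t.foldl max c)).mpr hmem)
        simp only [hc, if_false]
        rw [if_neg hne, PySem.List.index?_cons_of_ne t hcm, hi0]
        simp only [Option.map_some, Option.getD_some, Prod.mk.injEq, and_true]
        push_cast; ring
    · simp only [hac, if_false]
      rw [ih]
      have hmax : max a c = a := max_eq_left (not_lt.mp hac)
      rw [hmax]
      by_cases ha : t.foldl max a = a
      · simp [ha]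
      · have ham : c ≠ t.foldl max a := by
          intro h
          rw [h] at hac
          exact ha (le_antisymm (not_lt.mp hac) (PySem.List.le_foldl_max t a).1)
        have hmem : t.foldl max a ∈ t := by
          rcases List.mem_cons.mp (foldl_max_mem' t a) with h | h
          · exact absurd h ha
          · exact h
        obtain ⟨i0, hi0⟩ := Option.isSome_iff_exists.mp
          ((PySem.List.index?_isSome_iff t (t.foldl max a)).mpr hmem)
        simp only [ha, if_false]
        rw [PySem.List.index?_cons_of_ne t ham, hi0]
        simp only [Option.map_some, Option.getD_some, Prod.mk.injEq, and_true]
        push_cast; ring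

-- ===== VERDICT =====
theorem solution_spec : Claim_equal_solution := by
  intro s _
  unfold Spec_solution solution solution_alt
  rw [foldl_step_eq_gB]
  cases hs : s.toList with
  | nil => exact (String.ofList_eq.mpr hs.symm).symm
  | cons c t =>
    obtain ⟨k, hk, hg⟩ := gB_spec c t
    have hfold : List.foldl max c (c :: t) = List.foldl max c t := by
      simp [List.foldl_cons]
    simp only [loopA, hfold]
    by_cases hc : List.foldl max c t = c
    · simp only [hc, if_true]
      rw [hc, PySem.List.index?_cons_self] at hk
      have hk0 : k = 0 := by injection hk with h; omega
      subst hk0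
      rw [PySem.List.slice_from _ (by norm_num)]
      simp [hg]
    · simp only [hc, if_false, hk, Option.getD_some, zero_add]
      rw [PySem.List.slice_from _ (Int.natCast_nonneg k)]
      simp [hg]
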